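-- pv_equiv track=rewrite | github.com/Fondamenti18/fondamenti-di-programmazione | students/1747557/homework03/program01.py | generateRowMatrix
-- ===== SOURCE A (Python) =====
-- def generateRowMatrix(matrix):
--     n = len(matrix) #altezza
--     m = len(matrix[0])#larghezza
--     rowMatrix = [[0 for g in range(m)] for r in range(n)]
--
--     pivot = -1;
--     k = 0;
--     for i in range(0, n):
--         for j in range(0, m):
--             if (matrix[i][j] == 1):
--                 if (pivot == -1):
--                     pivot = j
--                 k += 1;
--             elif pivot != -1:
--                 #scarica
--                 for q in range(0, k):
--                     rowMatrix[i][pivot + q] = k - q;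
--
--                 k = 0
--                 pivot = -1
--         if pivot != -1:
--             #scarica
--             for q in range(0, k):
--                 rowMatrix[i][pivot + q] = k - q;
--             k = 0
--             pivot = -1
--
--
--     return rowMatrix;
-- ===== SOURCE B (Python) =====
-- def generateRowMatrix(matrix):
--     m = len(matrix[0])
--     result = []
--     for row in matrix:
--         labels = [0] * m
--         run = 0
--         for j in range(m - 1, -1, -1):
--             if row[j] == 1:
--                 run += 1
--                 labels[j] = run
--             else:
--                 run = 0
--         result.append(labels)
--     return result
-- ===== Notes on version B (the rewrite author's own statement) =====
-- stated objective: simpler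
-- what changed: A tracks a run's start (pivot) and length (k) while scanning each row left-to-right and back-fills the countdown labels in a separate discharge loop at each run end; B scans each row right-to-left with a single suffix run counter and writes each cell's label immediately, with no pivot tracking and no inner discharge loop.
import Mathlib
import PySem

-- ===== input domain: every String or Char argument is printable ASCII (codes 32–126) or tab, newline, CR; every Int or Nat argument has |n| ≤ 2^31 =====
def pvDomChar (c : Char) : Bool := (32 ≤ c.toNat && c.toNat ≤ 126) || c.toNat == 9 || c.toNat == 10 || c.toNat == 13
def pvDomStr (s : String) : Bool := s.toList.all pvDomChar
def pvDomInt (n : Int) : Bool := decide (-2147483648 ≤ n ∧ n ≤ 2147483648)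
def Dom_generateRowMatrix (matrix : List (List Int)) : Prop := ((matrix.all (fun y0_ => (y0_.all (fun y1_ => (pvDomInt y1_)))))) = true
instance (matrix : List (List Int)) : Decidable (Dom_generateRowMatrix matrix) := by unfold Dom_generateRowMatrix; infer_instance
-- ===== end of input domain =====

-- B replaces A's pivot/counter bookkeeping with one right-to-left suffix counter per row (objective: simpler).
-- ===== PORT A =====
-- Python's 'for q in range(0, k): rowMatrix[i][pivot + q] = k - q' (the "scarica"/discharge loop).
-- pivot is only used when ≠ -1, i.e. it was set to a column j ≥ 0, so pivot.toNat is exact;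
-- under Pre_ the indices i and pivot+q are always in range, so List.set/modify match Python's assignment.
def pvDischarge (rm : List (List Int)) (i : Nat) (pivot : Int) (k : Nat) : List (List Int) :=
  (List.range k).foldl (fun rm q => rm.modify i (fun row => row.set (pivot.toNat + q) ((k : Int) - (q : Int)))) rm

def generateRowMatrix (matrix : List (List Int)) : List (List Int) :=
  let n := matrix.length
  let m := (matrix.headD []).length        -- matrix[0]; Pre_ excludes the empty matrix, where Python raises
  let rowMatrix := List.replicate n (List.replicate m (0 : Int))
  -- state (rowMatrix, pivot, k); matrix[i][j] via getD, in range under Pre_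
  let fin := (List.range n).foldl (fun (st : List (List Int) × Int × Nat) i =>
      let st2 := (List.range m).foldl (fun (st : List (List Int) × Int × Nat) j =>
          let rm := st.1; let pivot := st.2.1; let k := st.2.2
          if (matrix.getD i []).getD j 0 = 1 then
            (rm, (if pivot = -1 then (j : Int) else pivot), k + 1)
          else if pivot ≠ -1 then
            (pvDischarge rm i pivot k, -1, 0)
          else
            (rm, pivot, k)) st
      let rm := st2.1; let pivot := st2.2.1; let k := st2.2.2
      if pivot ≠ -1 then (pvDischarge rm i pivot k, -1, 0) else (rm, pivot, k))
    (rowMatrix, -1, 0)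
  fin.1

-- ===== PORT B =====
-- one row of B: labels = [0]*m; run = 0; for j in range(m-1, -1, -1): …  (range(m-1,-1,-1) = indices m-1 … 0)
def pvRowB (row : List Int) (m : Nat) : List Int :=
  (((List.range m).reverse).foldl (fun (st : List Int × Int) j =>
      if row.getD j 0 = 1 then (st.1.set j (st.2 + 1), st.2 + 1) else (st.1, 0))
    (List.replicate m (0 : Int), 0)).1

def generateRowMatrix_alt (matrix : List (List Int)) : List (List Int) :=
  let m := (matrix.headD []).length        -- len(matrix[0]); Pre_ excludes the empty matrix, where Python raises
  matrix.foldl (fun acc row => acc ++ [pvRowB row m]) []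

-- ===== PRECONDITION & SPEC =====
-- Pre_: Python A raises IndexError on the empty matrix (matrix[0]) and whenever some row is shorter
-- than the first row (matrix[i][j] for j < m); B raises on exactly the same inputs.
def Pre_generateRowMatrix (matrix : List (List Int)) : Prop :=
  matrix ≠ [] ∧ ∀ row ∈ matrix, (matrix.headD []).length ≤ row.length
instance (matrix : List (List Int)) : Decidable (Pre_generateRowMatrix matrix) := by
  unfold Pre_generateRowMatrix; infer_instance

def pvWitness_generateRowMatrix : List (List Int) := [[1, 1, 0, 1], [0, 1, 1, 1]]

def Spec_generateRowMatrix (matrix : List (List Int)) (out : List (List Int)) : Prop := out = generateRowMatrix_alt matrix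
instance (matrix : List (List Int)) (out : List (List Int)) : Decidable (Spec_generateRowMatrix matrix out) := by unfold Spec_generateRowMatrix; infer_instance

-- ===== CLAIM (what is proved, stated in full; the proofs are below) =====
def Claim_equal_generateRowMatrix : Prop := ∀ (matrix : List (List Int)), Dom_generateRowMatrix matrix → Pre_generateRowMatrix matrix → Spec_generateRowMatrix matrix (generateRowMatrix matrix)

-- ===== LEMMAS AND PROOFS =====
def labelAux : List Int → Int → List Int × Int
  | [], r => ([], r)
  | x :: xs, r =>
    let p := labelAux xs r
    if x = 1 then ((p.2 + 1) :: p.1, p.2 + 1) else ((0 : Int) :: p.1, 0)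
def rowRes (row : List Int) (m : Nat) : List Int := (labelAux (row.take m) 0).1
def dischargeRow (pivot : Int) (k : Nat) (lbl : List Int) : List Int :=
  (List.range k).foldl (fun lbl q => lbl.set (pivot.toNat + q) ((k : Int) - (q : Int))) lbl
def stepRow (row : List Int) (st : List Int × Int × Nat) (j : Nat) : List Int × Int × Nat :=
  if row.getD j 0 = 1 then (st.1, (if st.2.1 = -1 then (j : Int) else st.2.1), st.2.2 + 1)
  else if st.2.1 ≠ -1 then (dischargeRow st.2.1 st.2.2 st.1, -1, 0)
  else st
def labelsPfx (row : List Int) (m p : Nat) : List Int :=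
  (labelAux (row.take p) 0).1 ++ List.replicate (m - p) (0 : Int)

lemma labelAux_fst_length (cs : List Int) (r : Int) : (labelAux cs r).1.length = cs.length := by
  induction cs generalizing r with
  | nil => rfl
  | cons x xs ih => simp only [labelAux]; split_ifs <;> simp [ih]

lemma labelAux_append (xs ys : List Int) (r : Int) :
    labelAux (xs ++ ys) r =
      ((labelAux xs (labelAux ys r).2).1 ++ (labelAux ys r).1,
       (labelAux xs (labelAux ys r).2).2) := by
  induction xs with
  | nil => simp [labelAux]
  | cons x xs ih =>
    simp only [List.cons_append, labelAux, ih]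
    split_ifs <;> simp

lemma labelAux_fst_irrel (xs : List Int) (c : Int) (hc : c ≠ 1) (r : Int) :
    labelAux (xs ++ [c]) r = ((labelAux xs 0).1 ++ [(0 : Int)], (labelAux xs 0).2) := by
  rw [labelAux_append]; simp [labelAux, hc]

lemma labelAux_ones (k : Nat) :
    labelAux (List.replicate k 1) 0 = ((List.range k).map (fun q : Nat => (k : Int) - (q : Int)), (k : Int)) := by
  induction k with
  | zero => simp [labelAux]
  | succ k ih =>
    rw [List.replicate_succ]
    simp only [labelAux, ih]
    rw [if_true]
    refine Prod.ext ?_ (by push_cast; ring)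
    simp only [List.range_succ_eq_map, List.map_cons, List.map_map]
    refine congrArg₂ _ (by push_cast; ring) ?_
    apply List.map_congr_left; intro q _
    simp only [Function.comp_apply]; push_cast; ring

lemma take_succ_getD (l : List Int) (t : Nat) (h : t < l.length) :
    l.take (t + 1) = l.take t ++ [l.getD t 0] := by
  rw [List.getD_eq_getElem _ _ h]; exact List.take_succ_eq_append_getElem h

lemma take_ones (row : List Int) (p k : Nat) (hlen : p + k ≤ row.length)
    (hones : ∀ q, p ≤ q → q < p + k → row.getD q 0 = 1) :
    row.take (p + k) = row.take p ++ List.replicate k 1 := by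
  induction k with
  | zero => simp
  | succ k ih =>
    have h1 : row.take (p + (k + 1)) = row.take (p + k) ++ [row.getD (p + k) 0] := by
      rw [show p + (k + 1) = (p + k) + 1 by ring]
      exact take_succ_getD _ _ (by omega)
    rw [h1, ih (by omega) (fun q hq hq' => hones q hq (by omega)),
        hones (p + k) (by omega) (by omega), List.replicate_succ' (n := k), List.append_assoc]

lemma labelAux_take_fst_clean (row : List Int) (p : Nat) (hp : p ≤ row.length)
    (hclean : p = 0 ∨ row.getD (p - 1) 0 ≠ 1) (r : Int) :
    (labelAux (row.take p) r).1 = (labelAux (row.take p) 0).1 := by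
  rcases hclean with h0 | hne
  · subst h0; simp [labelAux]
  · rcases Nat.eq_zero_or_pos p with h0 | hpos
    · subst h0; simp [labelAux]
    · have hdec : row.take p = row.take (p - 1) ++ [row.getD (p - 1) 0] := by
        have := take_succ_getD row (p - 1) (by omega)
        rwa [show p - 1 + 1 = p by omega] at this
      rw [hdec, labelAux_fst_irrel _ _ hne, labelAux_fst_irrel _ _ hne]

lemma foldl_set_range (p : Nat) (v : Nat → Int) :
    ∀ (k : Nat) (pre suf : List Int), pre.length = p → k ≤ suf.length →
    (List.range k).foldl (fun l q => l.set (p + q) (v q)) (pre ++ suf)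
      = pre ++ (List.range k).map v ++ suf.drop k := by
  intro k
  induction k with
  | zero => intro pre suf _ _; simp
  | succ k ih =>
    intro pre suf hp hk
    rw [List.range_succ, List.foldl_append, ih pre suf hp (by omega), List.foldl_cons, List.foldl_nil]
    have hdrop : suf.drop k = suf.getD k 0 :: suf.drop (k + 1) := by
      rw [List.getD_eq_getElem _ _ (by omega)]
      exact List.drop_eq_getElem_cons (by omega)
    rw [List.append_assoc, List.append_assoc, hdrop]
    simp [hp]

lemma dischargeRow_labels (row : List Int) (m p k : Nat) (hm : m ≤ row.length) (hpk : p + k ≤ m)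
    (hones : ∀ q, p ≤ q → q < p + k → row.getD q 0 = 1)
    (hclean : p = 0 ∨ row.getD (p - 1) 0 ≠ 1) :
    dischargeRow (p : Int) k (labelsPfx row m p) = labelsPfx row m (p + k) := by
  unfold dischargeRow labelsPfx
  have hto : ((p : Int)).toNat = p := Int.toNat_natCast p
  have hlenpre : (labelAux (row.take p) 0).1.length = p := by
    rw [labelAux_fst_length, List.length_take]; omega
  rw [show (fun (lbl : List Int) (q : Nat) => lbl.set ((p : Int).toNat + q) ((k : Int) - (q : Int)))
        = (fun lbl q => lbl.set (p + q) ((k : Int) - (q : Int))) by rw [hto]]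
  rw [foldl_set_range p _ k _ _ hlenpre (by simp; omega)]
  rw [List.drop_replicate]
  have htake : row.take (p + k) = row.take p ++ List.replicate k 1 := take_ones row p k (by omega) hones
  rw [htake, labelAux_append, labelAux_ones]
  simp only []
  rw [labelAux_take_fst_clean row p (by omega) hclean (k:Int)]
  rw [show m - p - k = m - (p + k) by omega]

lemma labelsPfx_succ_ne (row : List Int) (m t : Nat) (ht : t < m) (hm : m ≤ row.length)
    (hc : row.getD t 0 ≠ 1) : labelsPfx row m (t + 1) = labelsPfx row m t := by
  unfold labelsPfx
  rw [take_succ_getD _ _ (by omega), labelAux_fst_irrel _ _ hc,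
      show m - t = (m - (t + 1)) + 1 by omega, List.replicate_succ, List.append_assoc]
  rfl

def flushA (s : List Int × Int × Nat) : List Int × Int × Nat :=
  if s.2.1 ≠ -1 then (dischargeRow s.2.1 s.2.2 s.1, -1, 0) else s

lemma Ainner (row : List Int) (m : Nat) (hm : m ≤ row.length) :
    ∀ (d t p k : Nat), t + d = m → p + k = t →
    (∀ q, p ≤ q → q < t → row.getD q 0 = 1) →
    (p = 0 ∨ row.getD (p - 1) 0 ≠ 1) →
    flushA ((List.range' t d).foldl (stepRow row)
        (labelsPfx row m p, (if k = 0 then (-1 : Int) else (p : Int)), k))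
      = (labelsPfx row m m, -1, 0) := by
  intro d
  induction d with
  | zero =>
    intro t p k htd hpk hones hclean
    simp only [List.range', List.foldl_nil, flushA]
    rcases Nat.eq_zero_or_pos k with hk | hk
    · subst hk
      rw [if_pos rfl]
      simp only [ne_eq, not_true_eq_false]
      rw [if_neg (by simp)]
      have : p = m := by omega
      subst this; rfl
    · rw [if_neg (show ¬(k = 0) by omega)]
      simp only [ne_eq]
      rw [if_pos (show ¬((p : Int) = -1) by omega)]
      rw [dischargeRow_labels row m p k hm (by omega) (by intro q h1 h2; exact hones q h1 (by omega)) hclean]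
      rw [show p + k = m by omega]
  | succ d ih =>
    intro t p k htd hpk hones hclean
    rw [List.range'_succ, List.foldl_cons]
    by_cases hc : row.getD t 0 = 1
    · -- cell is 1: extend the run
      have hstep : stepRow row (labelsPfx row m p, (if k = 0 then (-1 : Int) else (p : Int)), k) t
          = (labelsPfx row m p, (if k + 1 = 0 then (-1 : Int) else (p : Int)), k + 1) := by
        unfold stepRow
        rw [if_pos hc]
        rcases Nat.eq_zero_or_pos k with hk | hk
        · subst hk
          simp only []
          have : p = t := by omega
          subst this; simp
        · rw [if_neg (show ¬(k = 0) by omega), if_neg (show ¬((p : Int) = -1) by omega)]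
          simp
      rw [hstep]
      exact ih (t + 1) p (k + 1) (by omega) (by omega)
        (fun q h1 h2 => by rcases Nat.lt_or_ge q t with h | h
                           · exact hones q h1 h
                           · have : q = t := by omega
                             subst this; exact hc) hclean
    · -- cell is not 1
      rcases Nat.eq_zero_or_pos k with hk | hk
      · -- no pending run: state unchanged
        subst hk
        have hp : p = t := by omega
        subst hp
        have hstep : stepRow row (labelsPfx row m p, (-1 : Int), 0) p
            = (labelsPfx row m p, (-1 : Int), 0) := by
          unfold stepRow
          rw [if_neg hc]
          simp
        rw [if_pos rfl, hstep]
        have hL : labelsPfx row m p = labelsPfx row m (p + 1) :=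
          (labelsPfx_succ_ne row m p (by omega) hm hc).symm
        rw [hL, show ((-1 : Int) = if 0 = 0 then (-1 : Int) else ((p+1 : Nat) : Int)) by simp]
        exact ih (p + 1) (p + 1) 0 (by omega) (by omega) (by omega)
          (Or.inr (by simpa using hc))
      · -- pending run: discharge
        have hstep : stepRow row (labelsPfx row m p, (if k = 0 then (-1 : Int) else (p : Int)), k) t
            = (labelsPfx row m (t + 1), -1, 0) := by
          unfold stepRow
          rw [if_neg hc, if_neg (show ¬(k = 0) by omega)]
          simp only [ne_eq]
          rw [if_pos (show ¬((p : Int) = -1) by omega)]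
          rw [dischargeRow_labels row m p k hm (by omega) (by intro q h1 h2; exact hones q h1 (by omega)) hclean]
          rw [show p + k = t by omega, labelsPfx_succ_ne row m t (by omega) hm hc]
        rw [hstep]
        rw [show ((-1 : Int) = if 0 = 0 then (-1 : Int) else ((t+1 : Nat) : Int)) by simp]
        exact ih (t + 1) (t + 1) 0 (by omega) (by omega) (by omega)
          (Or.inr (by simpa using hc))

lemma modify_set_same (l : List (List Int)) (i : Nat) (f : List Int → List Int) (x : List Int) :
    (l.modify i f).set i x = l.set i x := by
  induction l generalizing i with
  | nil => simp
  | cons a l ih => cases i <;> simp [List.modify_cons, ih]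

lemma getD_modify_self (l : List (List Int)) (i : Nat) (f : List Int → List Int) (h : i < l.length) :
    (l.modify i f).getD i [] = f (l.getD i []) := by
  simp [List.getD, h]

lemma foldl_modify (g : Nat → List Int → List Int) (i : Nat) :
    ∀ (l : List Nat) (rm : List (List Int)),
    l.foldl (fun rm q => rm.modify i (g q)) rm
      = rm.modify i (fun row => l.foldl (fun row q => g q row) row) := by
  intro l
  induction l with
  | nil => intro rm; exact (List.modify_id i rm).symm
  | cons a l ih =>
    intro rm
    rw [List.foldl_cons, ih, List.modify_modify_eq]
    rfl

lemma pvDischarge_eq (rm : List (List Int)) (i : Nat) (pivot : Int) (k : Nat) :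
    pvDischarge rm i pivot k = rm.modify i (dischargeRow pivot k) := by
  unfold pvDischarge dischargeRow
  exact foldl_modify _ i _ rm

def stepM (row : List Int) (i : Nat) (st : List (List Int) × Int × Nat) (j : Nat) :
    List (List Int) × Int × Nat :=
  if row.getD j 0 = 1 then (st.1, (if st.2.1 = -1 then (j : Int) else st.2.1), st.2.2 + 1)
  else if st.2.1 ≠ -1 then (pvDischarge st.1 i st.2.1 st.2.2, -1, 0)
  else st

lemma inner_sim (row : List Int) (i : Nat) :
    ∀ (js : List Nat) (rm : List (List Int)) (pv : Int) (k : Nat), i < rm.length →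
    js.foldl (stepM row i) (rm, pv, k)
      = (rm.set i (js.foldl (stepRow row) (rm.getD i [], pv, k)).1,
         (js.foldl (stepRow row) (rm.getD i [], pv, k)).2) := by
  intro js
  induction js with
  | nil => intro rm pv k h; simp [List.set_getElem_self, List.getD, h]
  | cons j js ih =>
    intro rm pv k h
    rw [List.foldl_cons, List.foldl_cons]
    by_cases hc : row.getD j 0 = 1
    · have h1 : stepM row i (rm, pv, k) j
          = (rm, (if pv = -1 then (j : Int) else pv), k + 1) := by
        unfold stepM; rw [if_pos hc]
      have h2 : stepRow row (rm.getD i [], pv, k) j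
          = (rm.getD i [], (if pv = -1 then (j : Int) else pv), k + 1) := by
        unfold stepRow; rw [if_pos hc]
      rw [h1, h2]
      exact ih rm _ _ h
    · by_cases hp : pv = -1
      · have h1 : stepM row i (rm, pv, k) j = (rm, pv, k) := by
          unfold stepM; rw [if_neg hc]; simp [hp]
        have h2 : stepRow row (rm.getD i [], pv, k) j = (rm.getD i [], pv, k) := by
          unfold stepRow; rw [if_neg hc]; simp [hp]
        rw [h1, h2]
        exact ih rm _ _ h
      · have h1 : stepM row i (rm, pv, k) j = (rm.modify i (dischargeRow pv k), -1, 0) := by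
          unfold stepM; rw [if_neg hc, if_pos hp, pvDischarge_eq]
        have h2 : stepRow row (rm.getD i [], pv, k) j
            = (dischargeRow pv k (rm.getD i []), -1, 0) := by
          unfold stepRow; rw [if_neg hc, if_pos hp]
        rw [h1, h2]
        rw [ih (rm.modify i (dischargeRow pv k)) _ _ (by simpa using h)]
        rw [getD_modify_self _ _ _ h, modify_set_same]

lemma set_modify_same (l : List (List Int)) (i : Nat) (f : List Int → List Int) (x : List Int) :
    (l.set i x).modify i f = l.set i (f x) := by
  induction l generalizing i with
  | nil => simp
  | cons a l ih => cases i <;> simp [List.modify_cons, ih]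

def stepOuter (matrix : List (List Int)) (m : Nat) (st : List (List Int) × Int × Nat) (i : Nat) :
    List (List Int) × Int × Nat :=
  let st2 := (List.range m).foldl (stepM (matrix.getD i []) i) st
  if st2.2.1 ≠ -1 then (pvDischarge st2.1 i st2.2.1 st2.2.2, -1, 0) else st2

lemma labelsPfx_self (row : List Int) (m : Nat) : labelsPfx row m m = rowRes row m := by
  simp [labelsPfx, rowRes]

lemma labelsPfx_zero (row : List Int) (m : Nat) : labelsPfx row m 0 = List.replicate m 0 := by
  simp [labelsPfx, labelAux]

lemma stepOuter_clean (matrix : List (List Int)) (m : Nat) (rm : List (List Int)) (i : Nat)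
    (h : i < rm.length) (hrow : rm.getD i [] = List.replicate m 0)
    (hm : m ≤ (matrix.getD i []).length) :
    stepOuter matrix m (rm, -1, 0) i = (rm.set i (rowRes (matrix.getD i []) m), -1, 0) := by
  unfold stepOuter
  rw [inner_sim (matrix.getD i []) i (List.range m) rm (-1) 0 h, hrow]
  have hA := Ainner (matrix.getD i []) m hm m 0 0 0 (by omega) (by omega)
      (by omega) (Or.inl rfl)
  rw [labelsPfx_zero, labelsPfx_self, if_pos rfl, ← List.range_eq_range'] at hA
  set s := (List.range m).foldl (stepRow (matrix.getD i []))
      (List.replicate m (0 : Int), (-1 : Int), (0 : Nat)) with hs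
  by_cases hp : s.2.1 = -1
  · rw [if_neg (by simp [hp])]
    unfold flushA at hA
    rw [if_neg (by simp [hp])] at hA
    rw [hA]
  · rw [if_pos (by simp [hp])]
    unfold flushA at hA
    rw [if_pos (by simp [hp])] at hA
    have h1 : dischargeRow s.2.1 s.2.2 s.1 = rowRes (matrix.getD i []) m := by
      injection hA with h1 _
    rw [pvDischarge_eq, set_modify_same, h1]

lemma Aouter (matrix : List (List Int)) (m : Nat) (hpre : ∀ row ∈ matrix, m ≤ row.length) :
    ∀ (d i : Nat) (rm : List (List Int)), i + d = matrix.length → rm.length = matrix.length →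
    (∀ i', i ≤ i' → i' < matrix.length → rm.getD i' [] = List.replicate m 0) →
    (List.range' i d).foldl (stepOuter matrix m) (rm, -1, 0)
      = (rm.take i ++ (matrix.drop i).map (fun row => rowRes row m), -1, 0) := by
  intro d
  induction d with
  | zero =>
    intro i rm hi hlen _
    rw [show (List.range' i 0) = [] from rfl, List.foldl_nil,
        List.take_of_length_le (by omega), List.drop_of_length_le (by omega)]
    simp
  | succ d ih =>
    intro i rm hi hlen hinv
    have hilt : i < matrix.length := by omega
    have hirm : i < rm.length := by omega
    rw [List.range'_succ, List.foldl_cons,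
        stepOuter_clean matrix m rm i hirm (hinv i le_rfl hilt)
          (hpre _ (by rw [List.getD_eq_getElem _ _ (by omega)]; exact List.getElem_mem _))]
    rw [ih (i + 1) _ (by omega) (by simpa using hlen)
        (fun i' h1 h2 => by
          rw [List.getD_eq_getElem _ _ (by simpa using (by omega : i' < rm.length)),
              List.getElem_set_ne (by omega)]
          rw [← List.getD_eq_getElem _ _ (by omega : i' < rm.length)]
          exact hinv i' (by omega) h2)]
    have htake : (rm.set i (rowRes (matrix.getD i []) m)).take (i + 1)
        = rm.take i ++ [rowRes (matrix.getD i []) m] := by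
      rw [List.take_succ_eq_append_getElem (by simpa using hirm)]
      simp [List.take_set]
      exact List.set_eq_of_length_le (by simp)
    have hdrop : matrix.drop i = matrix.getD i [] :: matrix.drop (i + 1) := by
      rw [List.getD_eq_getElem _ _ hilt]
      exact List.drop_eq_getElem_cons hilt
    rw [htake, hdrop, List.map_cons, List.append_assoc]
    rfl

lemma Bgen (row : List Int) (m : Nat) :
    ∀ (t : Nat) (L : List Int) (r : Int), t ≤ m → m ≤ row.length → L.length = m →
    (∀ j, j < t → row.getD j 0 ≠ 1 → L.getD j 0 = 0) →
    ((List.range t).reverse.foldl (fun (st : List Int × Int) j =>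
        if row.getD j 0 = 1 then (st.1.set j (st.2 + 1), st.2 + 1) else (st.1, 0)) (L, r))
      = ((labelAux (row.take t) r).1 ++ L.drop t, (labelAux (row.take t) r).2) := by
  intro t
  induction t with
  | zero => intro L r _ _ _ _; simp [labelAux]
  | succ t ih =>
    intro L r htm hm hL hinv
    rw [List.range_succ, List.reverse_append, List.reverse_singleton, List.singleton_append,
        List.foldl_cons]
    have htrow : t < row.length := by omega
    have htake : row.take (t + 1) = row.take t ++ [row.getD t 0] := take_succ_getD row t htrow
    by_cases hc : row.getD t 0 = 1
    · rw [if_pos hc]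
      rw [ih (L.set t (r + 1)) (r + 1) (by omega) hm (by simpa using hL)
          (fun j hj hjne => by
            rw [List.getD_eq_getElem _ _ (by simp; omega), List.getElem_set_ne (by omega),
                ← List.getD_eq_getElem _ _ (by omega : j < L.length)]
            exact hinv j (by omega) hjne)]
      have hdropset : (L.set t (r + 1)).drop t = (r + 1) :: L.drop (t + 1) := by
        rw [List.drop_eq_getElem_cons (by simp; omega)]
        rw [List.drop_set_of_lt (by omega)]
        simp
      rw [hdropset, htake, hc, labelAux_append]
      simp [labelAux]
    · rw [if_neg hc]
      rw [ih L 0 (by omega) hm hL (fun j hj hjne => hinv j (by omega) hjne)]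
      have hdrop : L.drop t = (0 : Int) :: L.drop (t + 1) := by
        rw [List.drop_eq_getElem_cons (by omega : t < L.length)]
        rw [show L[t] = L.getD t 0 from (List.getD_eq_getElem _ _ (by omega)).symm]
        rw [hinv t (by omega) hc]
      rw [hdrop, htake, labelAux_fst_irrel _ _ hc]
      simp

lemma B_row (row : List Int) (m : Nat) (hm : m ≤ row.length) : pvRowB row m = rowRes row m := by
  unfold pvRowB rowRes
  rw [Bgen row m m (List.replicate m 0) 0 le_rfl hm (by simp)
      (fun j hj _ => List.getD_replicate _ hj)]
  simp

-- ===== VERDICT (by name: the statement is the Claim_ definition above) =====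
theorem generateRowMatrix_spec : Claim_equal_generateRowMatrix := by
  intro matrix _ hpre
  unfold Spec_generateRowMatrix
  obtain ⟨hne, hrows⟩ := hpre
  have hA : generateRowMatrix matrix
      = ((List.range matrix.length).foldl (stepOuter matrix ((matrix.headD []).length))
          (List.replicate matrix.length (List.replicate ((matrix.headD []).length) 0), -1, 0)).1 := rfl
  have hB : generateRowMatrix_alt matrix
      = matrix.foldl (fun acc row => acc ++ [pvRowB row ((matrix.headD []).length)]) [] := rfl
  rw [hA, hB, PySem.List.foldl_append_singleton_eq_map, List.range_eq_range',
      Aouter matrix _ hrows matrix.length 0 _ (by omega) (by simp)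
        (fun i' _ h => List.getD_replicate _ h)]
  simp only [List.take_zero, List.drop_zero, List.nil_append]
  exact List.map_congr_left (fun row hrow => (B_row row _ (hrows row hrow)).symm)
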